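-- pv_equiv track=rewrite | github.com/calivine/vid_station | vid_station/util.py | form_clip_list
-- ===== SOURCE A (Python) =====
-- def form_clip_list(inpt):
--     clip_list = []
--     clip_list_raw = inpt[1:-1]
--     cll = clip_list_raw.split(",")
--     cll.reverse()
--     st = True
--     while len(cll) > 0:
--         ts = cll.pop()
--         if st:
--             start = ts
--             st = False
--         else:
--             end = ts
--             st = True
--             clip_list.append([start, end])
--     return clip_list
-- ===== SOURCE B (Python) =====
-- def form_clip_list(inpt):
--     it = iter(inpt[1:-1].split(","))
--     return [[a, b] for a, b in zip(it, it)]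
-- ===== Notes on version B (the rewrite author's own statement) =====
-- stated objective: idiomatic
-- what changed: Replaced A's reverse-then-pop while-loop with its start/end toggle flag and accumulator by an idiomatic iterator pairing, zip(it, it) over the split tokens, which takes tokens two at a time and naturally drops a final unpaired token.
import Mathlib
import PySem

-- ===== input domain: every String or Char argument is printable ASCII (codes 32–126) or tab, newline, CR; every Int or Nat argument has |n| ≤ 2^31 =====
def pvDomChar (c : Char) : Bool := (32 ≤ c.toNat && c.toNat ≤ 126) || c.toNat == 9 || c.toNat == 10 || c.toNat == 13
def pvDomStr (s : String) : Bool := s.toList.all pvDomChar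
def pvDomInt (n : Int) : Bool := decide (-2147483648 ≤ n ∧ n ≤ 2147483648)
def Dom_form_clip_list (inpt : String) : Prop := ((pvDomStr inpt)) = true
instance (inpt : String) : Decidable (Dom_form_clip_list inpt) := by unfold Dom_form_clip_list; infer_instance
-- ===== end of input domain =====

-- B replaces A's reverse/pop/flag while-loop with an idiomatic iterator-pairing (zip(it, it)); same return value, similar cost.

-- ===== PORT A =====
-- A's while-loop: pops from the end of the reversed token list, toggling a flag.
def pvLoopA (cllRev : List String) (st : Bool) (start : String)
    (clip_list : List (List String)) : List (List String) :=
  if h : cllRev = [] then clip_list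
  else
    let ts := cllRev.getLast h
    let rest := cllRev.dropLast
    if st then pvLoopA rest false ts clip_list
    else pvLoopA rest true start (clip_list ++ [[start, ts]])
termination_by cllRev.length
decreasing_by
  all_goals
    simpa [rest, List.length_dropLast] using Nat.sub_lt (List.length_pos_of_ne_nil h) one_pos

def form_clip_list (inpt : String) : List (List String) :=
  let clip_list : List (List String) := []
  let clip_list_raw := PySem.Str.slice inpt (some 1) (some (-1))
  -- split? is 'some' here since the separator "," is non-empty
  let cll := (PySem.Str.split? clip_list_raw ",").getD []
  let cllRev := cll.reverse
  -- 'start' is uninitialized in the Python before the first iteration; "" is never used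
  pvLoopA cllRev true "" clip_list

-- ===== PORT B =====
-- consuming zip(it, it): take tokens two at a time
def pvPairs : List String → List (List String)
  | a :: b :: rest => [a, b] :: pvPairs rest
  | _ => []

def form_clip_list_alt (inpt : String) : List (List String) :=
  -- split? is 'some' here since the separator "," is non-empty
  let cll := (PySem.Str.split? (PySem.Str.slice inpt (some 1) (some (-1))) ",").getD []
  pvPairs cll

-- ===== PRECONDITION & SPEC =====
def Spec_form_clip_list (inpt : String) (out : List (List String)) : Prop := out = form_clip_list_alt inpt
instance (inpt : String) (out : List (List String)) : Decidable (Spec_form_clip_list inpt out) := by unfold Spec_form_clip_list; infer_instance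

-- ===== CLAIM (what is proved, stated in full; the proofs are below) =====
def Claim_equal_form_clip_list : Prop := ∀ (inpt : String), Dom_form_clip_list inpt → Spec_form_clip_list inpt (form_clip_list inpt)

-- ===== LEMMAS AND PROOFS =====

lemma pvLoopA_concat (ys : List String) (y : String) (st : Bool) (start : String)
    (acc : List (List String)) :
    pvLoopA (ys ++ [y]) st start acc =
      if st then pvLoopA ys false y acc
      else pvLoopA ys true start (acc ++ [[start, y]]) := by
  rw [pvLoopA]
  simp

lemma pvLoopA_reverse (l : List String) (st : Bool) (start : String)
    (acc : List (List String)) :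
    pvLoopA l.reverse st start acc =
      if st then acc ++ pvPairs l
      else match l with
        | [] => acc
        | e :: r => (acc ++ [[start, e]]) ++ pvPairs r := by
  induction l generalizing st start acc with
  | nil => cases st <;> simp [pvLoopA, pvPairs]
  | cons x xs ih =>
    rw [List.reverse_cons, pvLoopA_concat]
    cases st with
    | true =>
      rw [if_pos rfl, ih]
      cases xs <;> simp [pvPairs]
    | false =>
      rw [if_neg (by simp), ih]
      simp

-- ===== VERDICT (by name: the statement is the Claim_ definition above) =====
theorem form_clip_list_spec : Claim_equal_form_clip_list := by
  intro inpt _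
  unfold Spec_form_clip_list form_clip_list form_clip_list_alt
  simp [pvLoopA_reverse]
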